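-- pv_equiv track=rewrite | github.com/thomaz-brito/Design-de-Software | Laços de Repetição (while)/MaiorPrimo.py | maior_primo_menor_que
-- ===== SOURCE A (Python) =====
-- def maior_primo_menor_que(n):
--     if n<2:
--         return -1
--     elif n==2:
--         return n
--     else:
--         i=n
--         while i>=3:
--             a=2
--             while a<i:
--                 if i%a==0:
--                     a=i+1
--                 else:
--                     a+=1
--                     if a==i:
--                         return i
--             i-=1
-- ===== SOURCE B (Python) =====
-- def maior_primo_menor_que(n):
--     # Largest prime <= n, or -1 if none. Scans only odd candidates downward
--     # and tests each by trial division by odd divisors up to sqrt(candidate).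
--     if n < 2:
--         return -1
--     if n == 2:
--         return 2
--     i = n if n % 2 else n - 1
--     while i >= 3:
--         d = 3
--         is_prime = True
--         while d * d <= i:
--             if i % d == 0:
--                 is_prime = False
--                 break
--             d += 2
--         if is_prime:
--             return i
--         i -= 2
-- ===== Notes on version B (the rewrite author's own statement) =====
-- stated objective: faster
-- what changed: A tests each candidate by scanning all divisors 2..i-1; B scans only odd candidates downward and trial-divides each by odd divisors up to sqrt(candidate).
import Mathlib
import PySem

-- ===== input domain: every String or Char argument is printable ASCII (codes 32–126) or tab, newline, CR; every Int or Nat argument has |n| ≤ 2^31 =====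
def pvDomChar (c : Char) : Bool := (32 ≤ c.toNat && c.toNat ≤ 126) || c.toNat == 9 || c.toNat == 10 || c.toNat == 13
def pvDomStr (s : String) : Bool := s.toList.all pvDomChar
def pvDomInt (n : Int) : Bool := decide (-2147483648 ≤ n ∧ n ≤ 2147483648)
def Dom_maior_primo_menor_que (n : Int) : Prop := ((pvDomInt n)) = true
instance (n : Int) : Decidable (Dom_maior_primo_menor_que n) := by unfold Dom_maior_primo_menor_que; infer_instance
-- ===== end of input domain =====

-- B replaces A's per-candidate scan of ALL divisors 2..i-1 by trial division by odd
-- divisors up to sqrt(i), and scans only odd candidates downward (objective: faster).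

-- ===== PORT A =====
-- inner `while a < i` of A; returns true exactly when the `return i` line fires.
-- All `%` here are on positive operands (3 ≤ i, 2 ≤ a < i), where Lean's Int `%` equals Python's.
def pvInnerA (i a : Int) : Bool :=
  if _h : a < i then
    if i % a == 0 then false          -- a = i + 1 : the loop then exits without returning
    else if a + 1 == i then true      -- a += 1 ; if a == i : return i
    else pvInnerA i (a + 1)
  else false
termination_by (i - a).toNat
decreasing_by omega

-- outer `while i >= 3` of A. If the loop ran out (i < 3) Python would fall off and
-- return None; that is unreachable from any start i ≥ 3 (3 itself passes the inner test),
-- so the -1 in that branch is never produced on A's path.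
def pvOuterA (i : Int) : Int :=
  if _h : 3 ≤ i then
    if pvInnerA i 2 then i else pvOuterA (i - 1)
  else -1
termination_by (i - 2).toNat
decreasing_by omega

def maior_primo_menor_que (n : Int) : Int :=
  if n < 2 then -1
  else if n = 2 then n
  else pvOuterA n

-- ===== PORT B =====
-- inner `while d * d <= i` of B, over Nat (it is only entered with 3 ≤ i, where
-- i = ↑i.toNat and Python's `%` on positive operands is Nat `%`).
def pvTrialB (m d : Nat) : Bool :=
  if _h : d * d ≤ m then
    if m % d == 0 then false          -- is_prime = False ; break
    else pvTrialB m (d + 2)           -- d += 2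
  else true
termination_by m + 1 - d
decreasing_by
  have hdm : d ≤ m := by
    rcases Nat.eq_zero_or_pos d with h0 | h1
    · omega
    · exact le_trans (Nat.le_mul_of_pos_left d h1) _h
  omega

-- outer `while i >= 3` of B; falls off (returns -1 here) only if the scan runs out,
-- which is unreachable from an odd start i ≥ 3 (the scan reaches 3, which passes).
def pvLoopB (i : Int) : Int :=
  if _h : 3 ≤ i then
    if pvTrialB i.toNat 3 then i else pvLoopB (i - 2)
  else -1
termination_by (i - 2).toNat
decreasing_by omega

def maior_primo_menor_que_alt (n : Int) : Int :=
  if n < 2 then -1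
  else if n = 2 then 2
  else pvLoopB (if n % 2 = 0 then n - 1 else n)   -- i = n if n % 2 else n - 1  (n ≥ 3 here)

-- ===== PRECONDITION & SPEC =====
def Spec_maior_primo_menor_que (n : Int) (out : Int) : Prop := out = maior_primo_menor_que_alt n
instance (n : Int) (out : Int) : Decidable (Spec_maior_primo_menor_que n out) := by unfold Spec_maior_primo_menor_que; infer_instance

-- ===== CLAIM (what is proved, stated in full; the proofs are below) =====
def Claim_equal_maior_primo_menor_que : Prop := ∀ (n : Int), Dom_maior_primo_menor_que n → Spec_maior_primo_menor_que n (maior_primo_menor_que n)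

-- ===== LEMMAS AND PROOFS =====

-- A's inner loop from a answers: no k in [a, i) divides i.
theorem pvInnerA_iff (fuel : Nat) : ∀ (a i : Int), (i - a).toNat ≤ fuel → 2 ≤ a → a < i →
    (pvInnerA i a = true ↔ ∀ k : Int, a ≤ k → k < i → ¬ (k ∣ i)) := by
  induction fuel with
  | zero => intro a i hf _ hlt; omega
  | succ f ih =>
    intro a i hf ha hlt
    rw [pvInnerA, dif_pos hlt]
    by_cases hdvd : i % a = 0
    · simp only [hdvd, beq_self_eq_true, if_true]
      constructor
      · intro h; exact absurd h (by simp)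
      · intro h; exact absurd (Int.dvd_of_emod_eq_zero hdvd) (h a le_rfl hlt)
    · have hne : ¬ a ∣ i := fun hd => hdvd (Int.emod_eq_zero_of_dvd hd)
      rw [if_neg (by simpa using hdvd)]
      by_cases heq : a + 1 = i
      · simp only [heq, beq_self_eq_true, if_true, true_iff]
        intro k hk1 hk2
        have : k = a := by omega
        subst this; exact hne
      · rw [if_neg (by simpa using heq)]
        rw [ih (a + 1) i (by omega) (by omega) (by omega)]
        constructor
        · intro h k hk1 hk2
          rcases eq_or_lt_of_le hk1 with h0 | h0
          · subst h0; exact hne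
          · exact h k (by omega) hk2
        · intro h k hk1 hk2; exact h k (by omega) hk2

-- A's inner test from a = 2 is primality of i (for 3 ≤ i).
theorem pvInnerA_prime (i : Int) (hi : 3 ≤ i) :
    pvInnerA i 2 = true ↔ Nat.Prime i.toNat := by
  rw [pvInnerA_iff (i - 2).toNat 2 i le_rfl le_rfl (by omega), Nat.prime_def_lt']
  constructor
  · intro h
    refine ⟨by omega, fun m hm2 hmi hdv => ?_⟩
    have := h (m : Int) (by omega) (by omega)
    apply this
    have : ((m : Int)) ∣ ((i.toNat : Int)) := Int.natCast_dvd_natCast.mpr hdv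
    simpa [Int.toNat_of_nonneg (by omega : (0:Int) ≤ i)] using this
  · intro ⟨_, h⟩ k hk1 hk2 hdv
    have hk : k = ((k.toNat : Int)) := by omega
    have : (k.toNat : Int) ∣ ((i.toNat : Int)) := by
      rw [← hk]; rw [← Int.toNat_of_nonneg (by omega : (0:Int) ≤ i)] at hdv; exact hdv
    exact h k.toNat (by omega) (by omega) (Int.natCast_dvd_natCast.mp this)

-- A's inner test fails on even i ≥ 4 (first candidate a = 2 divides).
theorem pvInnerA_even (i : Int) (h4 : 4 ≤ i) (he : i % 2 = 0) : pvInnerA i 2 = false := by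
  rw [pvInnerA, dif_pos (by omega)]
  simp [he]

-- B's trial loop from d answers: no d + 2j with square ≤ m divides m.
theorem pvTrialB_iff (fuel : Nat) : ∀ (d m : Nat), m + 1 - d ≤ fuel →
    (pvTrialB m d = true ↔ ∀ j : Nat, (d + 2*j) * (d + 2*j) ≤ m → ¬ (d + 2*j) ∣ m) := by
  induction fuel with
  | zero =>
    intro d m hf
    have hd : m + 1 ≤ d := by omega
    rw [pvTrialB, dif_neg (by nlinarith)]
    simp only [true_iff]
    intro j hj
    have : d + 2*j ≤ (d + 2*j) * (d + 2*j) := Nat.le_mul_of_pos_left _ (by omega)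
    omega
  | succ f ih =>
    intro d m hf
    rw [pvTrialB]
    by_cases hle : d * d ≤ m
    · rw [dif_pos hle]
      by_cases hdvd : m % d = 0
      · simp only [hdvd, beq_self_eq_true, if_true]
        constructor
        · intro h; exact absurd h (by simp)
        · intro h
          exact absurd (Nat.dvd_of_mod_eq_zero hdvd) (by simpa using h 0 (by simpa using hle))
      · have hne : ¬ d ∣ m := fun hd => hdvd (Nat.mod_eq_zero_of_dvd hd)
        rw [if_neg (by simpa using hdvd)]
        rw [ih (d + 2) m (by omega)]
        constructor
        · intro h j hj
          rcases j with _ | j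
          · simpa using hne
          · have e : d + 2 * (j + 1) = d + 2 + 2 * j := by ring
            rw [e] at hj ⊢
            exact h j hj
        · intro h j hj
          have e : d + 2 + 2 * j = d + 2 * (j + 1) := by ring
          rw [e] at hj ⊢
          exact h (j + 1) hj
    · rw [dif_neg hle]
      simp only [true_iff]
      intro j hj
      have : d * d ≤ (d + 2*j) * (d + 2*j) := Nat.mul_le_mul (by omega) (by omega)
      omega

-- B's trial test from d = 3 is primality of m, for odd m ≥ 3.
theorem pvTrialB_prime (m : Nat) (h3 : 3 ≤ m) (hodd : m % 2 = 1) :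
    pvTrialB m 3 = true ↔ Nat.Prime m := by
  rw [pvTrialB_iff (m + 1) 3 m (by omega)]
  constructor
  · intro h
    by_contra hp
    set p := m.minFac with hpdef
    have hpp : p.Prime := Nat.minFac_prime (by omega)
    have hpd : p ∣ m := Nat.minFac_dvd m
    have hp2 : p ≠ 2 := by
      intro h2
      have : m % 2 = 0 := Nat.mod_eq_zero_of_dvd (h2 ▸ hpd)
      omega
    have hpodd : p % 2 = 1 := by
      rcases Nat.mod_two_eq_zero_or_one p with h0 | h1
      · exact absurd ((Nat.Prime.even_iff hpp).mp (Nat.even_iff.mpr h0)) hp2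
      · exact h1
    have hp3 : 3 ≤ p := by have := hpp.two_le; omega
    have hpsq : p * p ≤ m := by
      have := Nat.minFac_sq_le_self (by omega) hp
      nlinarith [this]
    have hrep : 3 + 2 * ((p - 3) / 2) = p := by omega
    have := h ((p - 3) / 2) (by rw [hrep]; exact hpsq)
    rw [hrep] at this
    exact this hpd
  · intro hp j hj hdv
    rcases (hp.eq_one_or_self_of_dvd _ hdv) with h1 | h1
    · omega
    · rw [h1] at hj; nlinarith

-- The two primality tests agree on odd i ≥ 3.
theorem test_eq (i : Int) (h3 : 3 ≤ i) (hodd : i % 2 = 1) :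
    pvInnerA i 2 = pvTrialB i.toNat 3 := by
  rw [Bool.eq_iff_iff, pvInnerA_prime i h3, pvTrialB_prime i.toNat (by omega) (by omega)]

-- The downward scans agree on every odd start i = 2k + 3.
theorem outer_eq_loop : ∀ (k : Nat) (i : Int), i = 2*(k:Int) + 3 → pvOuterA i = pvLoopB i := by
  intro k
  induction k with
  | zero =>
    intro i hi
    have h3 : i = 3 := by push_cast at hi; omega
    subst h3
    rw [pvOuterA, dif_pos (by omega), pvLoopB, dif_pos (by omega)]
    have h1 : pvInnerA 3 2 = true := by
      rw [pvInnerA, dif_pos (by omega)]; decide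
    have h2 : pvTrialB (3:Int).toNat 3 = true := by
      rw [pvTrialB]; rw [dif_neg (by decide)]
    rw [h1, h2]
    simp
  | succ k ih =>
    intro i hi
    have h5 : 5 ≤ i := by omega
    have hodd : i % 2 = 1 := by omega
    have hA : pvOuterA i = if pvInnerA i 2 then i else pvOuterA (i - 1) := by
      rw [pvOuterA, dif_pos (by omega)]
    have hB : pvLoopB i = if pvTrialB i.toNat 3 then i else pvLoopB (i - 2) := by
      rw [pvLoopB, dif_pos (by omega)]
    rw [hA, hB, test_eq i (by omega) hodd]
    by_cases ht : pvTrialB i.toNat 3 = true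
    · rw [ht]; simp
    · rw [Bool.not_eq_true] at ht
      rw [ht]; simp only [if_false, Bool.false_eq_true]
      have hstep : pvOuterA (i - 1) = pvOuterA (i - 2) := by
        rw [pvOuterA, dif_pos (by omega), pvInnerA_even (i - 1) (by omega) (by omega)]
        simp only [Bool.false_eq_true, if_false]
        have e : i - 1 - 1 = i - 2 := by ring
        rw [e]
      rw [hstep]
      exact ih (i - 2) (by push_cast at hi; omega)

-- ===== VERDICT (by name: the statement is the Claim_ definition above) =====
theorem maior_primo_menor_que_spec : Claim_equal_maior_primo_menor_que := by
  intro n _dom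
  unfold Spec_maior_primo_menor_que maior_primo_menor_que maior_primo_menor_que_alt
  by_cases h2 : n < 2
  · rw [if_pos h2, if_pos h2]
  · rw [if_neg h2, if_neg h2]
    by_cases he : n = 2
    · rw [if_pos he, if_pos he, he]
    · rw [if_neg he, if_neg he]
      have h3 : 3 ≤ n := by omega
      by_cases hodd : n % 2 = 1
      · rw [if_neg (by omega)]
        obtain ⟨k, hk⟩ : ∃ k : Nat, n = 2*(k:Int) + 3 := ⟨((n-3)/2).toNat, by omega⟩
        exact outer_eq_loop k n hk
      · have heven : n % 2 = 0 := by omega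
        rw [if_pos heven]
        have hstep : pvOuterA n = pvOuterA (n - 1) := by
          rw [pvOuterA, dif_pos (by omega), pvInnerA_even n (by omega) heven]
          simp
        rw [hstep]
        obtain ⟨k, hk⟩ : ∃ k : Nat, n - 1 = 2*(k:Int) + 3 := ⟨((n-4)/2).toNat, by omega⟩
        exact outer_eq_loop k (n - 1) hk
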